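-- pv_equiv track=rewrite | github.com/BHANUPRAKASH-HUB/python-practice | geeksforgeekspython/pair_cube_count.py | pairCubeCount
-- ===== SOURCE A (Python) =====
-- def pairCubeCount(n):
--     count = 0
--
--     # Precompute cubes for speed
--     cubes = set()
--     i = 0
--     while i**3 <= n:
--         cubes.add(i**3)
--         i += 1
--
--     a = 1
--     while a**3 <= n:
--         remaining = n - a**3
--         if remaining in cubes:
--             count += 1
--         a += 1
--
--     return count
-- ===== SOURCE B (Python) =====
-- def pairCubeCount(n):
--     # Count a >= 1 with a**3 <= n and n - a**3 a perfect cube,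
--     # testing cubeness with an exact integer binary search (no precomputed set).
--     def is_cube(m):
--         lo, hi = 0, m
--         while lo < hi:
--             mid = (lo + hi) // 2
--             if mid ** 3 < m:
--                 lo = mid + 1
--             else:
--                 hi = mid
--         return lo ** 3 == m
--
--     count = 0
--     a = 1
--     while a ** 3 <= n:
--         if is_cube(n - a ** 3):
--             count += 1
--         a += 1
--     return count
-- ===== Notes on version B (the rewrite author's own statement) =====
-- stated objective: simpler
-- what changed: Dropped A's precomputed cube set and its build loop; B keeps the single loop over the first summand and tests the remainder for being a perfect cube on the fly with an exact integer binary search for the cube root.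
import Mathlib
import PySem

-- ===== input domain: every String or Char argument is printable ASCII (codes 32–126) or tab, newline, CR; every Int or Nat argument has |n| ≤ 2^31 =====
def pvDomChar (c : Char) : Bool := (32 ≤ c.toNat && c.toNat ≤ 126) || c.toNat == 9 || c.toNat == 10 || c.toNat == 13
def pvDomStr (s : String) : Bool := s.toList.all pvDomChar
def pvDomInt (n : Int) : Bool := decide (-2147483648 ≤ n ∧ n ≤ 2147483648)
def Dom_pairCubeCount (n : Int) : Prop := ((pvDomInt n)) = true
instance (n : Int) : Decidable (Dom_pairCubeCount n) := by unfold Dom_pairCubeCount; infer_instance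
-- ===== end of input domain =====

-- B drops A's precomputed cube set and its build loop; it keeps the single loop over a
-- and tests n - a**3 for cubeness with an exact integer binary search (objective: simpler).
-- The while-loops are ported with an explicit fuel counter that only makes them total:
-- each fuel value is large enough that the loop always exits on its own guard first.

-- ===== PORT A =====
-- the Python loop counter i only ever takes the values 0, 1, 2, …, so it is a Nat here
-- (cast to Int where Python computes i**3); otherwise step for step.
def pvCubesLoop (n : Int) : Nat → Nat → PySem.Set Int → PySem.Set Int
  | 0, _, s => s
  | fuel + 1, i, s =>
    if (i : Int) ^ 3 ≤ n then pvCubesLoop n fuel (i + 1) (PySem.Set.add s ((i : Int) ^ 3))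
    else s

def pvCountLoopA (n : Int) (cubes : PySem.Set Int) : Nat → Nat → Int → Int
  | 0, _, count => count
  | fuel + 1, a, count =>
    if (a : Int) ^ 3 ≤ n then
      pvCountLoopA n cubes fuel (a + 1)
        (if PySem.Set.contains cubes (n - (a : Int) ^ 3) then count + 1 else count)
    else count

def pairCubeCount (n : Int) : Int :=
  pvCountLoopA n (pvCubesLoop n (n + 1).toNat 0 PySem.Set.empty) (n + 1).toNat 1 0

-- ===== PORT B =====
-- the 'while lo < hi' binary search of Source B's is_cube (mid inlined; '//' is floordiv)
def pvBsearch (m : Int) : Nat → Int → Int → Int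
  | 0, lo, _ => lo
  | fuel + 1, lo, hi =>
    if lo < hi then
      if (PySem.Int.floordiv (lo + hi) 2) ^ 3 < m then
        pvBsearch m fuel (PySem.Int.floordiv (lo + hi) 2 + 1) hi
      else
        pvBsearch m fuel lo (PySem.Int.floordiv (lo + hi) 2)
    else lo

def pvIsCube (m : Int) : Bool :=
  (pvBsearch m m.toNat 0 m) ^ 3 == m

def pvCountLoopB (n : Int) : Nat → Nat → Int → Int
  | 0, _, count => count
  | fuel + 1, a, count =>
    if (a : Int) ^ 3 ≤ n then
      pvCountLoopB n fuel (a + 1)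
        (if pvIsCube (n - (a : Int) ^ 3) then count + 1 else count)
    else count

def pairCubeCount_alt (n : Int) : Int :=
  pvCountLoopB n (n + 1).toNat 1 0

-- ===== PRECONDITION & SPEC =====
def Spec_pairCubeCount (n : Int) (out : Int) : Prop := out = pairCubeCount_alt n
instance (n : Int) (out : Int) : Decidable (Spec_pairCubeCount n out) := by unfold Spec_pairCubeCount; infer_instance

-- ===== CLAIM (what is proved, stated in full; the proofs are below) =====
def Claim_equal_pairCubeCount : Prop := ∀ (n : Int), Dom_pairCubeCount n → Spec_pairCubeCount n (pairCubeCount n)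

-- ===== LEMMAS AND PROOFS =====

theorem pv_self_le_cube (m : Int) (hm : 0 ≤ m) : m ≤ m ^ 3 := by
  rcases lt_or_ge m 1 with h | h
  · have : m = 0 := by omega
    simp [this]
  · have h2 : 1 ≤ m ^ 2 := by nlinarith
    nlinarith

theorem pv_cube_lt_cube {x y : Int} (h : x < y) : x ^ 3 < y ^ 3 := by
  nlinarith [sq_nonneg x, sq_nonneg y, sq_nonneg (x + y), sq_nonneg (x - y)]

theorem pv_cube_le_cube {x y : Int} (h : x ≤ y) : x ^ 3 ≤ y ^ 3 := by
  rcases lt_or_eq_of_le h with h | h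
  · exact le_of_lt (pv_cube_lt_cube h)
  · rw [h]

-- membership in the set built by A's precompute loop, for sufficient fuel
theorem pvCubesLoop_mem (n : Int) : ∀ (fuel i : Nat) (s : PySem.Set Int) (x : Int),
    n < (i : Int) + fuel →
    (x ∈ pvCubesLoop n fuel i s ↔
      x ∈ s ∨ ∃ j : Nat, i ≤ j ∧ (j : Int) ^ 3 ≤ n ∧ (j : Int) ^ 3 = x) := by
  intro fuel
  induction fuel with
  | zero =>
    intro i s x hf
    simp only [pvCubesLoop]
    constructor
    · exact Or.inl
    · rintro (hs | ⟨j, hj, hjn, _⟩)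
      · exact hs
      · exfalso
        have h1 : (i : Int) ≤ (j : Int) := by exact_mod_cast hj
        have h2 : (j : Int) ≤ (j : Int) ^ 3 := pv_self_le_cube _ (Int.natCast_nonneg j)
        simp only [Nat.cast_zero, add_zero] at hf
        omega
  | succ fuel ih =>
    intro i s x hf
    by_cases h : (i : Int) ^ 3 ≤ n
    · rw [pvCubesLoop, if_pos h, ih (i + 1) _ x (by push_cast; push_cast at hf; omega),
        PySem.Set.mem_add]
      constructor
      · rintro (⟨hs | he⟩ | ⟨j, hj, hjn, hjx⟩)
        · exact Or.inl hs
        · exact Or.inr ⟨i, le_refl _, h, he.symm⟩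
        · exact Or.inr ⟨j, by omega, hjn, hjx⟩
      · rintro (hs | ⟨j, hj, hjn, hjx⟩)
        · exact Or.inl (Or.inl hs)
        · rcases Nat.eq_or_lt_of_le hj with rfl | hlt
          · exact Or.inl (Or.inr hjx.symm)
          · exact Or.inr ⟨j, by omega, hjn, hjx⟩
    · rw [pvCubesLoop, if_neg h]
      constructor
      · exact Or.inl
      · rintro (hs | ⟨j, hj, hjn, hjx⟩)
        · exact hs
        · exfalso
          have h1 : (i : Int) ≤ (j : Int) := by exact_mod_cast hj
          exact h (le_trans (pv_cube_le_cube h1) hjn)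

-- invariant of B's binary search: if every x < lo cubes strictly below m and m ≤ hi³,
-- both still hold of the result (with lo = hi there), for sufficient fuel
theorem pvBsearch_spec (m : Int) : ∀ (fuel : Nat) (lo hi : Int),
    (hi - lo).toNat ≤ fuel → lo ≤ hi → (∀ x, x < lo → x ^ 3 < m) → m ≤ hi ^ 3 →
    (∀ x, x < pvBsearch m fuel lo hi → x ^ 3 < m) ∧ m ≤ (pvBsearch m fuel lo hi) ^ 3 := by
  intro fuel
  induction fuel with
  | zero =>
    intro lo hi hf hle hlo hhi
    have : lo = hi := by omega
    simp only [pvBsearch]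
    exact ⟨hlo, by rw [this]; exact hhi⟩
  | succ fuel ih =>
    intro lo hi hf hle hlo hhi
    by_cases h : lo < hi
    · have he : PySem.Int.floordiv (lo + hi) 2 = (lo + hi) / 2 :=
        PySem.Int.floordiv_eq_ediv_of_pos (by norm_num)
      by_cases hmid : (PySem.Int.floordiv (lo + hi) 2) ^ 3 < m
      · rw [pvBsearch, if_pos h, if_pos hmid]
        refine ih _ _ (by omega) (by omega) ?_ hhi
        intro x hx
        rcases lt_or_ge x (PySem.Int.floordiv (lo + hi) 2) with hx' | hx'
        · exact lt_of_lt_of_le (pv_cube_lt_cube hx') (le_of_lt hmid)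
        · have hxe : x = PySem.Int.floordiv (lo + hi) 2 := by omega
          rw [hxe]; exact hmid
      · rw [pvBsearch, if_pos h, if_neg hmid]
        exact ih _ _ (by omega) (by omega) hlo (not_lt.mp hmid)
    · rw [pvBsearch, if_neg h]
      have : lo = hi := by omega
      exact ⟨hlo, by rw [this]; exact hhi⟩

-- pvIsCube decides "m is the cube of a nonnegative integer" (for m ≥ 0)
theorem pvIsCube_iff (m : Int) (hm : 0 ≤ m) :
    pvIsCube m = true ↔ ∃ k : Int, 0 ≤ k ∧ k ^ 3 = m := by
  obtain ⟨h1, h2⟩ := pvBsearch_spec m m.toNat 0 m (by omega) hm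
    (fun x hx => by
      have hcube := pv_cube_lt_cube (y := 0) hx
      norm_num at hcube
      linarith)
    (pv_self_le_cube m hm)
  unfold pvIsCube
  constructor
  · intro h
    have he : (pvBsearch m m.toNat 0 m) ^ 3 = m := by simpa using h
    refine ⟨pvBsearch m m.toNat 0 m, ?_, he⟩
    rcases lt_or_ge (pvBsearch m m.toNat 0 m) 0 with hr | hr
    · have hcube := pv_cube_lt_cube (x := pvBsearch m m.toNat 0 m) (y := 0) hr
      norm_num at hcube
      linarith
    · exact hr
  · rintro ⟨k, hk0, hk⟩
    have hk_ge : pvBsearch m m.toNat 0 m ≤ k := by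
      rcases lt_or_ge k (pvBsearch m m.toNat 0 m) with hc | hc
      · exact absurd hk (ne_of_lt (h1 k hc))
      · exact hc
    have hre : (pvBsearch m m.toNat 0 m) ^ 3 = m := by
      rcases lt_or_eq_of_le hk_ge with hlt | heq
      · have := pv_cube_lt_cube hlt
        rw [hk] at this
        linarith
      · rw [heq]; exact hk
    simpa using hre

-- the per-iteration fact: for a ≥ 1 with a³ ≤ n, A's set test and B's cube test agree
theorem pv_cond_eq (n : Int) (a : Nat) (ha : 1 ≤ a) (h : (a : Int) ^ 3 ≤ n) :
    PySem.Set.contains (pvCubesLoop n (n + 1).toNat 0 PySem.Set.empty) (n - (a : Int) ^ 3)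
      = pvIsCube (n - (a : Int) ^ 3) := by
  have ha1 : (1 : Int) ≤ (a : Int) := by exact_mod_cast ha
  have ha3 : (1 : Int) ≤ (a : Int) ^ 3 :=
    le_trans ha1 (pv_self_le_cube _ (by omega))
  have hm : 0 ≤ n - (a : Int) ^ 3 := by omega
  rw [Bool.eq_iff_iff, PySem.Set.contains_iff,
    pvCubesLoop_mem n (n + 1).toNat 0 _ _ (by push_cast; omega), pvIsCube_iff _ hm]
  constructor
  · rintro (hs | ⟨j, _, _, hjx⟩)
    · exact absurd hs (by simp [PySem.Set.empty])
    · exact ⟨(j : Int), Int.natCast_nonneg j, hjx⟩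
  · rintro ⟨k, hk0, hk⟩
    refine Or.inr ⟨k.toNat, Nat.zero_le _, ?_, ?_⟩
    · rw [Int.toNat_of_nonneg hk0, hk]; omega
    · rw [Int.toNat_of_nonneg hk0]; exact hk

-- both counting loops share the guard and the fuel, so they agree step by step
theorem pv_loops_eq (n : Int) : ∀ (fuel a : Nat) (count : Int), 1 ≤ a →
    pvCountLoopA n (pvCubesLoop n (n + 1).toNat 0 PySem.Set.empty) fuel a count
      = pvCountLoopB n fuel a count := by
  intro fuel
  induction fuel with
  | zero => intro a count _; rfl
  | succ fuel ih =>
    intro a count ha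
    by_cases h : (a : Int) ^ 3 ≤ n
    · rw [pvCountLoopA, pvCountLoopB, if_pos h, if_pos h, pv_cond_eq n a ha h]
      exact ih (a + 1) _ (by omega)
    · rw [pvCountLoopA, pvCountLoopB, if_neg h, if_neg h]

-- ===== VERDICT (by name: the statement is the Claim_ definition above) =====
theorem pairCubeCount_spec : Claim_equal_pairCubeCount := by
  intro n _
  unfold Spec_pairCubeCount pairCubeCount pairCubeCount_alt
  exact pv_loops_eq n (n + 1).toNat 1 0 (le_refl 1)
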